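-- pv_equiv track=rewrite | github.com/datasciencesociety/elections | ocr_protocol_parser/compare_results.py | compare_protocols
-- ===== SOURCE A (Python) =====
-- def _parse_protocol_line(line: str) -> dict[str, str]:
--     """Parse a protocol line into a dict with field names."""
--     parts = line.strip().split(";")
--     keys = [
--         "form_number", "section_code", "rik_code", "page_numbers",
--         "field5", "field6", "ballots_received", "voter_list_count",
--         "additional_voters", "voted_count", "unused_ballots",
--         "invalid_ballots", "paper_ballots", "invalid_votes",
--         "no_support_paper", "valid_votes_paper",
--         "machine_ballots", "no_support_machine", "valid_votes_machine",
--     ]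
--     return {keys[i]: parts[i] if i < len(parts) else "" for i in range(len(keys))}
--
-- def compare_protocols(output_line: str, truth_line: str, section: str) -> list[str]:
--     """Compare two protocol lines field by field. Returns list of differences."""
--     out = _parse_protocol_line(output_line)
--     truth = _parse_protocol_line(truth_line)
--     diffs = []
--     for key in out:
--         if key in ("field5", "field6", "page_numbers"):
--             continue
--         o, t = out[key], truth[key]
--         if o != t:
--             diffs.append(f"  {key}: got={o} expected={t}")
--     return diffs
-- ===== SOURCE B (Python) =====
-- _KEYS = [
--     "form_number", "section_code", "rik_code", "page_numbers",
--     "field5", "field6", "ballots_received", "voter_list_count",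
--     "additional_voters", "voted_count", "unused_ballots",
--     "invalid_ballots", "paper_ballots", "invalid_votes",
--     "no_support_paper", "valid_votes_paper",
--     "machine_ballots", "no_support_machine", "valid_votes_machine",
-- ]
--
-- _SKIP = frozenset({"field5", "field6", "page_numbers"})
--
-- def _diff_fields(keys, out, truth):
--     """Recursive simultaneous descent over the key list and both value lists;
--     missing values fall out of the pattern as ''."""
--     if not keys:
--         return []
--     k = keys[0]
--     o = out[0] if out else ""
--     t = truth[0] if truth else ""
--     here = [] if k in _SKIP or o == t else [f"  {k}: got={o} expected={t}"]
--     return here + _diff_fields(keys[1:], out[1:], truth[1:])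
--
-- def compare_protocols(output_line: str, truth_line: str, section: str) -> list[str]:
--     """Compare two protocol lines field by field. Returns list of differences."""
--     return _diff_fields(_KEYS,
--                         output_line.strip().split(";"),
--                         truth_line.strip().split(";"))
-- ===== Notes on version B (the rewrite author's own statement) =====
-- stated objective: simpler
-- what changed: Replaced the two dict-building passes and the key-indexed accumulator loop by a single recursive simultaneous descent over the key list and both split value lists (no dicts, no indices, no accumulator; missing fields fall out of the recursion as '').
import Mathlib
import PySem

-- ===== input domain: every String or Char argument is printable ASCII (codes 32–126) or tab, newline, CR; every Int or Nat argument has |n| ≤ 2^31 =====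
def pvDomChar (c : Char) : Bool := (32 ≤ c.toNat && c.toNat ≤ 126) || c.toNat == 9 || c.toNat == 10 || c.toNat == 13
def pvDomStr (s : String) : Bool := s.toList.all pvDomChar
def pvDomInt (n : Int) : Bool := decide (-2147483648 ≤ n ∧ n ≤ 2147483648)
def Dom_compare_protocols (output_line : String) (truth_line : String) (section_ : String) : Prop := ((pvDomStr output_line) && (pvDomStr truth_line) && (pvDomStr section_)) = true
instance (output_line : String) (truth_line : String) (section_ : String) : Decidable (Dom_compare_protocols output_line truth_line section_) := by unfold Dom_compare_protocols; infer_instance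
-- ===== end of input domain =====

-- B replaces the dict-building passes and the key-indexed accumulator loop by one recursive simultaneous descent over the key list and both split value lists (objective: simpler).

-- ===== PORT A =====
def pvKeys : List String :=
  ["form_number", "section_code", "rik_code", "page_numbers",
   "field5", "field6", "ballots_received", "voter_list_count",
   "additional_voters", "voted_count", "unused_ballots",
   "invalid_ballots", "paper_ballots", "invalid_votes",
   "no_support_paper", "valid_votes_paper",
   "machine_ballots", "no_support_machine", "valid_votes_machine"]

-- helper _parse_protocol_line: strip, split on ';', dict comprehension over range(len(keys))
def parse_protocol_line (line : String) : PySem.Dict String String :=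
  let parts := (PySem.Str.split? (PySem.Str.strip line) ";").getD []
  (PySem.List.pyRange 0 (pvKeys.length) 1).foldl
    (fun d i =>
      d.insert (PySem.List.pyGetD pvKeys i "")
        (if i < (parts.length : Int) then PySem.List.pyGetD parts i "" else ""))
    PySem.Dict.empty

def compare_protocols (output_line : String) (truth_line : String) (section_ : String) : List String :=
  let out := parse_protocol_line output_line
  let truth := parse_protocol_line truth_line
  out.keys.foldl
    (fun diffs key =>
      if key = "field5" ∨ key = "field6" ∨ key = "page_numbers" then diffs
      else
        let o := out.getD key ""
        let t := truth.getD key ""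
        if o ≠ t then diffs ++ ["  " ++ key ++ ": got=" ++ o ++ " expected=" ++ t]
        else diffs)
    []

-- ===== PORT B =====
-- helper _diff_fields: recursion on the key list, both value lists stepped in parallel
def diff_fields : List String → List String → List String → List String
  | [], _, _ => []
  | k :: ks, out, truth =>
    let o := out.headD ""
    let t := truth.headD ""
    let here :=
      if (k = "field5" ∨ k = "field6" ∨ k = "page_numbers") ∨ o = t then []
      else ["  " ++ k ++ ": got=" ++ o ++ " expected=" ++ t]
    here ++ diff_fields ks out.tail truth.tail

def compare_protocols_alt (output_line : String) (truth_line : String) (section_ : String) : List String :=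
  diff_fields pvKeys
    ((PySem.Str.split? (PySem.Str.strip output_line) ";").getD [])
    ((PySem.Str.split? (PySem.Str.strip truth_line) ";").getD [])

-- ===== PRECONDITION & SPEC =====
def Spec_compare_protocols (output_line : String) (truth_line : String) (section_ : String) (out : List String) : Prop := out = compare_protocols_alt output_line truth_line section_
instance (output_line : String) (truth_line : String) (section_ : String) (out : List String) : Decidable (Spec_compare_protocols output_line truth_line section_ out) := by unfold Spec_compare_protocols; infer_instance

-- ===== CLAIM (what is proved, stated in full; the proofs are below) =====
def Claim_equal_compare_protocols : Prop := ∀ (output_line : String) (truth_line : String) (section_ : String), Dom_compare_protocols output_line truth_line section_ → Spec_compare_protocols output_line truth_line section_ (compare_protocols output_line truth_line section_)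

-- ===== LEMMAS AND PROOFS =====

-- the fresh-key insert loop of parse builds exactly the positional assoc list
theorem dict_items (v : Int → String) :
    (PySem.List.pyRange 0 (pvKeys.length) 1).foldl
      (fun d i => d.insert (PySem.List.pyGetD pvKeys i "") (v i)) PySem.Dict.empty
    = PySem.Dict.mk ((PySem.List.pyRange 0 (pvKeys.length) 1).map
        (fun i => (PySem.List.pyGetD pvKeys i "", v i))) := by
  apply PySem.Dict.ext
  rw [PySem.Dict.items_foldl_insert_fresh]
  · simp [PySem.Dict.empty]
  · intro a _; simp
  · rw [PySem.List.map_pyGetD_pyRange_zero']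
    decide

-- A's skip/append loop is a flatMap over the key list
theorem foldl_skip_if {α β : Type} (l : List α) (p : α → Prop) [DecidablePred p]
    (q : α → Prop) [DecidablePred q] (g : α → β) (acc : List β) :
    l.foldl (fun acc a => if p a then acc else if q a then acc ++ [g a] else acc) acc
    = acc ++ l.flatMap (fun a => if p a then [] else if q a then [g a] else []) := by
  induction l generalizing acc with
  | nil => simp
  | cons x xs ih => simp only [List.foldl_cons, List.flatMap_cons, ih]; split_ifs <;> simp

-- a guarded positional access: out of range the lookup already yields the default
theorem ite_getElem_getD (l : List String) (i : Nat) :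
    (if i < l.length then l[i]?.getD "" else "") = l[i]?.getD "" := by
  split_ifs with h
  · rfl
  · simp [List.getElem?_eq_none (Nat.le_of_not_lt h)]

-- A's skip/append accumulator loop over the dict keys, as a flatMap
theorem Aloop (dOut dTr : PySem.Dict String String) :
    dOut.keys.foldl
      (fun diffs key =>
        if key = "field5" ∨ key = "field6" ∨ key = "page_numbers" then diffs
        else
          if dOut.getD key "" ≠ dTr.getD key "" then
            diffs ++ ["  " ++ key ++ ": got=" ++ dOut.getD key "" ++ " expected=" ++ dTr.getD key ""]
          else diffs) []
    = dOut.keys.flatMap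
      (fun key =>
        if key = "field5" ∨ key = "field6" ∨ key = "page_numbers" then []
        else if dOut.getD key "" ≠ dTr.getD key "" then
          ["  " ++ key ++ ": got=" ++ dOut.getD key "" ++ " expected=" ++ dTr.getD key ""]
        else []) := by
  rw [foldl_skip_if]
  simp

-- core: for any two split lists, A's dict loops equal B's recursion
theorem core_eq (po pt : List String) :
    (let out := (PySem.List.pyRange 0 (pvKeys.length) 1).foldl
      (fun d i => d.insert (PySem.List.pyGetD pvKeys i "")
        (if i < (po.length : Int) then PySem.List.pyGetD po i "" else "")) PySem.Dict.empty
    let truth := (PySem.List.pyRange 0 (pvKeys.length) 1).foldl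
      (fun d i => d.insert (PySem.List.pyGetD pvKeys i "")
        (if i < (pt.length : Int) then PySem.List.pyGetD pt i "" else "")) PySem.Dict.empty
    out.keys.foldl
      (fun diffs key =>
        if key = "field5" ∨ key = "field6" ∨ key = "page_numbers" then diffs
        else
          let o := out.getD key ""
          let t := truth.getD key ""
          if o ≠ t then diffs ++ ["  " ++ key ++ ": got=" ++ o ++ " expected=" ++ t]
          else diffs) [])
    = diff_fields pvKeys po pt := by
  dsimp only
  rw [dict_items, dict_items, Aloop]
  have hr : PySem.List.pyRange 0 (pvKeys.length) 1 = [0,1,2,3,4,5,6,7,8,9,10,11,12,13,14,15,16,17,18] := by decide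
  rw [hr]
  simp only [List.map_cons, List.map_nil, PySem.List.pyGetD_ofNat']
  simp [pvKeys, PySem.Dict.keys, PySem.Dict.getD, PySem.Dict.get?_mk_cons, List.flatMap,
    diff_fields, ite_getElem_getD, List.head?_eq_getElem?, ← List.drop_one, List.drop_drop]

-- ===== VERDICT (by name: the statement is the Claim_ definition above) =====
theorem compare_protocols_spec : Claim_equal_compare_protocols := by
  intro o t s _
  unfold Spec_compare_protocols compare_protocols compare_protocols_alt parse_protocol_line
  exact core_eq _ _
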